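-- pv_equiv track=rewrite | github.com/reynaldocv/leetcode | 3000 - 3999/3142. [Easy] Check if Grid Satisfies Conditions.py | satisfiesConditions
-- ===== SOURCE A (Python) =====
-- from typing import List
--
-- def satisfiesConditions(grid: List[List[int]]) -> bool:
--     m, n = len(grid), len(grid[0])
--
--     for i in range(n - 1):
--         if grid[0][i] == grid[0][i + 1]:
--             return False
--
--     grid = [[grid[i][j] for i in range(m)] for j in range(n)]
--
--     for row in grid:
--         if min(row) != max(row):
--             return False
--
--     return True
-- ===== SOURCE B (Python) =====
-- from typing import List
--
-- def satisfiesConditions(grid: List[List[int]]) -> bool: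
--     m, n = len(grid), len(grid[0])
--     for i in range(m):
--         for j in range(n):
--             if i + 1 < m and grid[i][j] != grid[i + 1][j]:
--                 return False
--             if j + 1 < n and grid[i][j] == grid[i][j + 1]:
--                 return False
--     return True
-- ===== Notes on version B (the rewrite author's own statement) =====
-- stated objective: simpler
-- what changed: B replaces A's transpose construction plus per-column min/max aggregation and separate first-row pass with a single direct double loop comparing each cell to its right and lower neighbours; no transpose or min/max is materialised.
-- outside the precondition, e.g. on satisfiesConditions([[1, 1], []]): A returns False, B raises IndexError
import Mathlib
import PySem

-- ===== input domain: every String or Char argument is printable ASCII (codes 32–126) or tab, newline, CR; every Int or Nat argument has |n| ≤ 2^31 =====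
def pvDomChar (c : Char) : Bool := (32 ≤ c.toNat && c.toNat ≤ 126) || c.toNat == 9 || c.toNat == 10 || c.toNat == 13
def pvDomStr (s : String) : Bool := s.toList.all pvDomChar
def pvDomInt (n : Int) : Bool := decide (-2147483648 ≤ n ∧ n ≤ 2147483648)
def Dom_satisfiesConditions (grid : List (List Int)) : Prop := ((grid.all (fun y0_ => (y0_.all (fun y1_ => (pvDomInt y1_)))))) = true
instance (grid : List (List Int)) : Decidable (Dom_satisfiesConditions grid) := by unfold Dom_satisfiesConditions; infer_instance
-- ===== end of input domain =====

-- B replaces A's transpose + per-column min/max aggregation and separate first-row pass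
-- with a single direct double loop comparing each cell to its right and lower neighbours (simpler).


-- ===== PORT A =====
def satisfiesConditions (grid : List (List Int)) : Bool :=
  let m : Int := grid.length
  let row0 : List Int := grid.headD []          -- grid[0]; grid ≠ [] under Pre_
  let n : Int := row0.length
  if (PySem.List.pyRange 0 (n - 1) 1).any (fun i =>
       PySem.List.pyGetD row0 i 0 == PySem.List.pyGetD row0 (i + 1) 0) then false
  else
    -- grid = [[grid[i][j] for i in range(m)] for j in range(n)]
    let t : List (List Int) := (PySem.List.pyRange 0 n 1).map (fun j =>
      (PySem.List.pyRange 0 m 1).map (fun i =>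
        PySem.List.pyGetD (PySem.List.pyGetD grid i []) j 0))
    if t.any (fun row =>
         !(PySem.List.min? row (fun x => x) == PySem.List.max? row (fun x => x))) then false
    else true

-- ===== PORT B =====
def satisfiesConditions_alt (grid : List (List Int)) : Bool :=
  let m : Int := grid.length
  let n : Int := (grid.headD []).length
  if (PySem.List.pyRange 0 m 1).any (fun i =>
       (PySem.List.pyRange 0 n 1).any (fun j =>
         (decide (i + 1 < m) &&
            !(PySem.List.pyGetD (PySem.List.pyGetD grid i []) j 0 ==
              PySem.List.pyGetD (PySem.List.pyGetD grid (i + 1) []) j 0)) ||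
         (decide (j + 1 < n) &&
            (PySem.List.pyGetD (PySem.List.pyGetD grid i []) j 0 ==
             PySem.List.pyGetD (PySem.List.pyGetD grid i []) (j + 1) 0)))) then false
  else true

-- ===== PRECONDITION & SPEC =====
-- Pre_ excludes the empty grid and grids with a row shorter than the first row (non-rectangular),
-- on which A raises IndexError except when the first row's adjacent-equal check already returned False.
def Pre_satisfiesConditions (grid : List (List Int)) : Prop :=
  grid ≠ [] ∧ ∀ row ∈ grid, (grid.headD []).length ≤ row.length
instance (grid : List (List Int)) : Decidable (Pre_satisfiesConditions grid) := by
  unfold Pre_satisfiesConditions; infer_instance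
def pvWitness_satisfiesConditions : List (List Int) := [[1, 2], [1, 2]]

def Spec_satisfiesConditions (grid : List (List Int)) (out : Bool) : Prop := out = satisfiesConditions_alt grid
instance (grid : List (List Int)) (out : Bool) : Decidable (Spec_satisfiesConditions grid out) := by unfold Spec_satisfiesConditions; infer_instance

-- ===== CLAIM (what is proved, stated in full; the proofs are below) =====
def Claim_equal_satisfiesConditions : Prop := ∀ (grid : List (List Int)), Dom_satisfiesConditions grid → Pre_satisfiesConditions grid → Spec_satisfiesConditions grid (satisfiesConditions grid)

-- ===== LEMMAS AND PROOFS =====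

def gG (grid : List (List Int)) (i j : Int) : Int :=
  PySem.List.pyGetD (PySem.List.pyGetD grid i []) j 0

lemma B_true_iff (grid : List (List Int)) :
    satisfiesConditions_alt grid = true ↔
    ∀ i j : Int, 0 ≤ i → i < grid.length → 0 ≤ j → j < ((grid.headD []).length : Int) →
      (i + 1 < grid.length → gG grid i j = gG grid (i+1) j) ∧
      (j + 1 < ((grid.headD []).length : Int) → gG grid i j ≠ gG grid i (j+1)) := by
  simp only [satisfiesConditions_alt, gG]
  by_cases h : ((PySem.List.pyRange 0 (grid.length : Int) 1).any (fun i =>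
       (PySem.List.pyRange 0 ((grid.headD []).length : Int) 1).any (fun j =>
         (decide (i + 1 < (grid.length : Int)) &&
            !(PySem.List.pyGetD (PySem.List.pyGetD grid i []) j 0 ==
              PySem.List.pyGetD (PySem.List.pyGetD grid (i + 1) []) j 0)) ||
         (decide (j + 1 < ((grid.headD []).length : Int)) &&
            (PySem.List.pyGetD (PySem.List.pyGetD grid i []) j 0 ==
             PySem.List.pyGetD (PySem.List.pyGetD grid i []) (j + 1) 0))))) = true
  · rw [if_pos h]
    simp only [Bool.false_eq_true, false_iff]
    intro hall
    simp only [List.any_eq_true, PySem.List.mem_pyRange_one] at h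
    obtain ⟨i, ⟨hi0, him⟩, j, ⟨hj0, hjn⟩, hb⟩ := h
    have hc := hall i j hi0 him hj0 hjn
    simp only [Bool.or_eq_true, Bool.and_eq_true, decide_eq_true_eq, Bool.not_eq_true',
      beq_eq_false_iff_ne, beq_iff_eq] at hb
    rcases hb with ⟨h1, h2⟩ | ⟨h1, h2⟩
    · exact h2 (hc.1 h1)
    · exact (hc.2 h1) h2
  · rw [if_neg h]
    rw [Bool.not_eq_true, List.any_eq_false] at h
    simp only [true_iff]
    intro i j hi0 him hj0 hjn
    have hthis := h _ (by rw [PySem.List.mem_pyRange_one]; exact ⟨hi0, him⟩)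
    rw [Bool.not_eq_true, List.any_eq_false] at hthis
    have ht2 := hthis j (by rw [PySem.List.mem_pyRange_one]; exact ⟨hj0, hjn⟩)
    constructor
    · intro h1
      by_contra hne
      exact ht2 (by rw [Bool.or_eq_true]; left; rw [Bool.and_eq_true]
                    exact ⟨by simpa using h1, by simpa using hne⟩)
    · intro h1 heq
      exact ht2 (by rw [Bool.or_eq_true]; right; rw [Bool.and_eq_true]
                    exact ⟨by simpa using h1, by simpa using heq⟩)

lemma minmax_eq_iff (xs : List Int) (h : xs ≠ []) :
    PySem.List.min? xs (fun x => x) = PySem.List.max? xs (fun x => x) ↔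
      ∀ x ∈ xs, ∀ y ∈ xs, x = y := by
  constructor
  · intro he x hx y hy
    cases hmin : PySem.List.min? xs (fun x => x) with
    | none => exact absurd ((PySem.List.min?_eq_none_iff xs _).mp hmin) h
    | some v =>
      have hmax : PySem.List.max? xs (fun x => x) = some v := by rw [← he, hmin]
      have e1 : x = v :=
        le_antisymm (PySem.List.max?_isMax hmax x hx) (PySem.List.min?_isMin hmin x hx)
      have e2 : y = v :=
        le_antisymm (PySem.List.max?_isMax hmax y hy) (PySem.List.min?_isMin hmin y hy)
      rw [e1, e2]
  · intro hall
    cases hmin : PySem.List.min? xs (fun x => x) with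
    | none => exact absurd ((PySem.List.min?_eq_none_iff xs _).mp hmin) h
    | some v =>
      cases hmax : PySem.List.max? xs (fun x => x) with
      | none =>
        exact absurd ((PySem.List.max?_eq_none_iff xs _).mp hmax) h
      | some w =>
        rw [hall v (PySem.List.min?_mem hmin) w (PySem.List.max?_mem hmax)]

lemma headD_eq_pyGetD (grid : List (List Int)) :
    PySem.List.pyGetD grid 0 [] = grid.headD [] := by
  cases grid with
  | nil => simp [PySem.List.pyGetD_zero]
  | cons a t => simp [PySem.List.pyGetD_zero_cons]

lemma col_ne_nil (grid : List (List Int)) (hne : grid ≠ []) (f : Int → Int) :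
    (PySem.List.pyRange 0 (grid.length : Int) 1).map f ≠ [] := by
  intro hcon
  have h1 := congrArg List.length hcon
  rw [List.length_map, PySem.List.length_pyRange_one] at h1
  simp only [List.length_nil] at h1
  have : grid.length = 0 := by omega
  exact hne (List.length_eq_zero_iff.mp this)

lemma A_true_iff (grid : List (List Int)) (hne : grid ≠ []) :
    satisfiesConditions grid = true ↔
    (∀ j : Int, 0 ≤ j → j + 1 < ((grid.headD []).length : Int) →
        gG grid 0 j ≠ gG grid 0 (j+1)) ∧
    (∀ j : Int, 0 ≤ j → j < ((grid.headD []).length : Int) →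
        ∀ i i' : Int, 0 ≤ i → i < grid.length → 0 ≤ i' → i' < grid.length →
          gG grid i j = gG grid i' j) := by
  have hg0 : ∀ j : Int, gG grid 0 j = PySem.List.pyGetD (grid.headD []) j 0 := by
    intro j; rw [gG, headD_eq_pyGetD]
  simp only [satisfiesConditions]
  by_cases h1 : ((PySem.List.pyRange 0 (((grid.headD []).length : Int) - 1) 1).any (fun i =>
      PySem.List.pyGetD (grid.headD []) i 0 == PySem.List.pyGetD (grid.headD []) (i + 1) 0)) = true
  · rw [if_pos h1]
    simp only [Bool.false_eq_true, false_iff, not_and]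
    intro ha _
    simp only [List.any_eq_true, PySem.List.mem_pyRange_one, beq_iff_eq] at h1
    obtain ⟨j, ⟨hj0, hjn⟩, hb⟩ := h1
    exact ha j hj0 (by omega) (by rw [hg0, hg0]; exact hb)
  · rw [if_neg h1]
    rw [Bool.not_eq_true, List.any_eq_false] at h1
    by_cases h2 : (((PySem.List.pyRange 0 ((grid.headD []).length : Int) 1).map (fun j =>
        (PySem.List.pyRange 0 (grid.length : Int) 1).map (fun i =>
          PySem.List.pyGetD (PySem.List.pyGetD grid i []) j 0))).any (fun row =>
        !(PySem.List.min? row (fun x => x) == PySem.List.max? row (fun x => x)))) = true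
    · rw [if_pos h2]
      simp only [Bool.false_eq_true, false_iff, not_and]
      intro _ hb
      simp only [List.any_eq_true, List.mem_map, PySem.List.mem_pyRange_one,
        Bool.not_eq_true', beq_eq_false_iff_ne] at h2
      obtain ⟨row, ⟨j, ⟨hj0, hjn⟩, hrow⟩, hmm⟩ := h2
      apply hmm
      rw [minmax_eq_iff]
      · intro x hx y hy
        rw [← hrow] at hx hy
        simp only [List.mem_map, PySem.List.mem_pyRange_one] at hx hy
        obtain ⟨i, ⟨hi0, him⟩, hix⟩ := hx
        obtain ⟨i', ⟨hi'0, hi'm⟩, hiy⟩ := hy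
        rw [← hix, ← hiy]
        exact hb j hj0 hjn i i' hi0 him hi'0 hi'm
      · rw [← hrow]
        exact col_ne_nil grid hne _
    · rw [if_neg h2]
      rw [Bool.not_eq_true, List.any_eq_false] at h2
      simp only [true_iff]
      constructor
      · intro j hj0 hjn hcon
        have hcontra := h1 j (by rw [PySem.List.mem_pyRange_one]; constructor <;> omega)
        rw [hg0, hg0] at hcon
        simp only [beq_iff_eq] at hcontra
        exact hcontra hcon
      · intro j hj0 hjn i i' hi0 him hi'0 hi'm
        have hr := h2 ((PySem.List.pyRange 0 (grid.length : Int) 1).map (fun i =>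
            PySem.List.pyGetD (PySem.List.pyGetD grid i []) j 0))
          (by simp only [List.mem_map, PySem.List.mem_pyRange_one]
              exact ⟨j, ⟨hj0, hjn⟩, rfl⟩)
        rw [Bool.not_eq_true, Bool.not_eq_false', beq_iff_eq,
          minmax_eq_iff _ (col_ne_nil grid hne _)] at hr
        have hm1 : gG grid i j ∈ (PySem.List.pyRange 0 (grid.length : Int) 1).map (fun i =>
            PySem.List.pyGetD (PySem.List.pyGetD grid i []) j 0) := by
          simp only [List.mem_map, PySem.List.mem_pyRange_one]
          exact ⟨i, ⟨hi0, him⟩, rfl⟩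
        have hm2 : gG grid i' j ∈ (PySem.List.pyRange 0 (grid.length : Int) 1).map (fun i =>
            PySem.List.pyGetD (PySem.List.pyGetD grid i []) j 0) := by
          simp only [List.mem_map, PySem.List.mem_pyRange_one]
          exact ⟨i', ⟨hi'0, hi'm⟩, rfl⟩
        exact hr _ hm1 _ hm2

lemma adjConst (f : Int → Int) (M : Int)
    (h : ∀ i : Int, 0 ≤ i → i + 1 < M → f i = f (i + 1)) :
    ∀ i : Int, 0 ≤ i → i < M → f i = f 0 := by
  have hk : ∀ k : Nat, (k : Int) < M → f k = f 0 := by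
    intro k
    induction k with
    | zero => intro _; norm_num
    | succ k ih =>
      intro hkM
      have hcast : ((k : Int)) + 1 < M := by push_cast at hkM; omega
      have e1 : f k = f (k + 1) := h k (by positivity) hcast
      have e2 := ih (by omega)
      push_cast
      rw [← e1]
      exact e2
  intro i hi0 hiM
  have := hk i.toNat (by rw [Int.toNat_of_nonneg hi0]; exact hiM)
  rw [Int.toNat_of_nonneg hi0] at this
  exact this

theorem A_eq_B_of_ne_nil : ∀ (grid : List (List Int)),
    grid ≠ [] → satisfiesConditions grid = satisfiesConditions_alt grid := by
  intro grid hne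
  have hm0 : (0 : Int) < grid.length := by
    have := List.length_pos_iff.mpr hne
    exact_mod_cast this
  rw [Bool.eq_iff_iff, A_true_iff grid hne, B_true_iff grid]
  constructor
  · intro ⟨h0, hcol⟩ i j hi0 him hj0 hjn
    constructor
    · intro hi1
      exact hcol j hj0 hjn i (i + 1) hi0 him (by omega) hi1
    · intro hj1
      have e1 : gG grid i j = gG grid 0 j := hcol j hj0 hjn i 0 hi0 him le_rfl hm0
      have e2 : gG grid i (j + 1) = gG grid 0 (j + 1) :=
        hcol (j + 1) (by omega) hj1 i 0 hi0 him le_rfl hm0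
      rw [e1, e2]
      exact h0 j hj0 hj1
  · intro hadj
    constructor
    · intro j hj0 hj1
      exact (hadj 0 j le_rfl hm0 hj0 (by omega)).2 hj1
    · intro j hj0 hjn i i' hi0 him hi'0 hi'm
      have hc := adjConst (fun i => gG grid i j) (grid.length : Int)
        (fun i hi0 hi1 => (hadj i j hi0 (by omega) hj0 hjn).1 hi1)
      have e1 := hc i hi0 him
      have e2 := hc i' hi'0 hi'm
      simp only at e1 e2
      rw [e1, e2]

-- ===== VERDICT (by name: the statement is the Claim_ definition above) =====
theorem satisfiesConditions_spec : Claim_equal_satisfiesConditions := by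
  intro grid _ hpre
  unfold Spec_satisfiesConditions
  exact A_eq_B_of_ne_nil grid hpre.1
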